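-- pv_equiv track=rewrite | github.com/kevinwainczak/advent | day10/index.py | move_points
-- ===== SOURCE A (Python) =====
-- def move_points(data):
--     max_x = -100000
--     min_x = 100000
--     max_y = -100000
--     min_y = 100000
--     for i in range(len(data)):
--         (x,y,vx,vy) = data[i]
--         new_x = x + vx
--         new_y = y + vy
--         data[i] = (new_x, new_y, vx,vy)
--         if new_x > max_x: max_x = new_x
--         if new_x < min_x: min_x = new_x
--         if new_y > max_y: max_y = new_y
--         if new_y < min_y: min_y = new_y
--     return (data, max_x, min_x, max_y, min_y)
-- ===== SOURCE B (Python) =====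
-- def move_points(data):
--     data[:] = [(x + vx, y + vy, vx, vy) for (x, y, vx, vy) in data]
--     xs = [p[0] for p in data]
--     ys = [p[1] for p in data]
--     return (data,
--             max(xs, default=-100000), min(xs, default=100000),
--             max(ys, default=-100000), min(ys, default=100000))
-- ===== Notes on version B (the rewrite author's own statement) =====
-- stated objective: simpler
-- what changed: Replaces the fused index loop with four conditional min/max trackers by an in-place comprehension update followed by separate built-in max/min scans with defaults.
-- intended difference: On nonempty inputs whose moved points all lie strictly beyond one of the +/-100000 sentinel bounds on the same side, A returns that sentinel as the bound while B returns the true extremum; the true bounding box is the intended value. — e.g. on move_points([(-200005, 5, 5, -5)]): A returns ([(-200000, 0, 5, -5)], -100000, -200000, 0, 0), B returns ([(-200000, 0, 5, -5)], -200000, -200000, 0, 0)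
import Mathlib
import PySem

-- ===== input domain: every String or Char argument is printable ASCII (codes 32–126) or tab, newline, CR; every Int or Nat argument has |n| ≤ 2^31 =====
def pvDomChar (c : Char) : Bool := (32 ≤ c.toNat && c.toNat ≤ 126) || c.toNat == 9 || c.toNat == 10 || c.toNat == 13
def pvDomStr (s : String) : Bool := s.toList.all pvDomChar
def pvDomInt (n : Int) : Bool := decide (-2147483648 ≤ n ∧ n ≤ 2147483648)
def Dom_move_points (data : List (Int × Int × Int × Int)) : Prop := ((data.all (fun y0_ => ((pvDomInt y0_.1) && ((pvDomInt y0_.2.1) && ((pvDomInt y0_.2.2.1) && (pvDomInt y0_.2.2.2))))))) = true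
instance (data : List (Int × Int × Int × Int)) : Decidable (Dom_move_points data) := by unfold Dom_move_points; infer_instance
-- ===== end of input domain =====

-- NOTE: Python A mutates its argument list in place; both Pythons perform that same
-- in-place update (B via data[:] = …), and the equivalence proved here is about the return value.
-- B replaces A's fused index loop (four conditional min/max trackers updated per step)
-- by an update pass followed by four separate built-in max/min scans with defaults (objective: simpler).

-- ===== PORT A =====
def move_points (data : List (Int × Int × Int × Int)) : (List (Int × Int × Int × Int)) × Int × Int × Int × Int :=
  List.foldl
    (fun acc p =>
      let nx := p.1 + p.2.2.1
      let ny := p.2.1 + p.2.2.2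
      (acc.1 ++ [(nx, ny, p.2.2.1, p.2.2.2)],
       if nx > acc.2.1 then nx else acc.2.1,
       if nx < acc.2.2.1 then nx else acc.2.2.1,
       if ny > acc.2.2.2.1 then ny else acc.2.2.2.1,
       if ny < acc.2.2.2.2 then ny else acc.2.2.2.2))
    ([], -100000, 100000, -100000, 100000) data

-- ===== PORT B =====
def move_points_alt (data : List (Int × Int × Int × Int)) : (List (Int × Int × Int × Int)) × Int × Int × Int × Int :=
  let moved := data.map (fun p => (p.1 + p.2.2.1, p.2.1 + p.2.2.2, p.2.2.1, p.2.2.2))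
  let xs := moved.map (fun p => p.1)
  let ys := moved.map (fun p => p.2.1)
  (moved,
   PySem.List.maxD xs (fun y => y) (-100000), PySem.List.minD xs (fun y => y) 100000,
   PySem.List.maxD ys (fun y => y) (-100000), PySem.List.minD ys (fun y => y) 100000)

-- ===== PRECONDITION & SPEC =====
-- On nonempty inputs whose moved points all lie strictly beyond one of the ±100000 sentinel
-- bounds on the same side, A returns that sentinel as the corresponding bound while B returns
-- the true extremum; the true bounding box is the intended value.
def D_move_points (data : List (Int × Int × Int × Int)) : Prop :=
  data ≠ [] ∧ ∃ s ∈ [(1 : Int), -1],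
    (∀ p ∈ data, 100000 < s * (p.1 + p.2.2.1)) ∨ (∀ p ∈ data, 100000 < s * (p.2.1 + p.2.2.2))
instance (data : List (Int × Int × Int × Int)) : Decidable (D_move_points data) := by
  unfold D_move_points; infer_instance

def Spec_move_points (data : List (Int × Int × Int × Int)) (out : (List (Int × Int × Int × Int)) × Int × Int × Int × Int) : Prop := ¬ D_move_points data → out = move_points_alt data
instance (data : List (Int × Int × Int × Int)) (out : (List (Int × Int × Int × Int)) × Int × Int × Int × Int) : Decidable (Spec_move_points data out) := by unfold Spec_move_points; infer_instance

def pvDiffWitness_move_points : (List (Int × Int × Int × Int)) := [(-200005, 5, 5, -5)]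
def pvDiffWitnessOut_move_points : ((List (Int × Int × Int × Int)) × Int × Int × Int × Int) × ((List (Int × Int × Int × Int)) × Int × Int × Int × Int) :=
  (([(-200000, 0, 5, -5)], -100000, -200000, 0, 0),
   ([(-200000, 0, 5, -5)], -200000, -200000, 0, 0))

-- ===== CLAIM (what is proved, stated in full; the proofs are below) =====
def Claim_unchanged_move_points : Prop := ∀ (data : List (Int × Int × Int × Int)), Dom_move_points data → Spec_move_points data (move_points data)
def Claim_changed_move_points : Prop := Dom_move_points (pvDiffWitness_move_points) ∧ D_move_points (pvDiffWitness_move_points) ∧ move_points (pvDiffWitness_move_points) = pvDiffWitnessOut_move_points.1 ∧ move_points_alt (pvDiffWitness_move_points) = pvDiffWitnessOut_move_points.2 ∧ pvDiffWitnessOut_move_points.1 ≠ pvDiffWitnessOut_move_points.2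
def Claim_exact_move_points : Prop := ∀ (data : List (Int × Int × Int × Int)), Dom_move_points data → D_move_points data → move_points data ≠ move_points_alt data

-- ===== LEMMAS AND PROOFS =====

def pvUpd (p : Int × Int × Int × Int) : Int × Int × Int × Int :=
  (p.1 + p.2.2.1, p.2.1 + p.2.2.2, p.2.2.1, p.2.2.2)

lemma pv_if_gt_eq_max (a v : Int) : (if v > a then v else a) = max a v := by
  split_ifs with h <;> omega

lemma pv_if_lt_eq_min (a v : Int) : (if v < a then v else a) = min a v := by
  split_ifs with h <;> omega

-- characterisation of A's fused fold: list part appends the moved points, the four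
-- trackers are running max/min folds over the moved coordinates
lemma pv_moveA_fold (l : List (Int × Int × Int × Int))
    (acc : List (Int × Int × Int × Int)) (a b c d : Int) :
    List.foldl
      (fun acc p =>
        let nx := p.1 + p.2.2.1
        let ny := p.2.1 + p.2.2.2
        (acc.1 ++ [(nx, ny, p.2.2.1, p.2.2.2)],
         if nx > acc.2.1 then nx else acc.2.1,
         if nx < acc.2.2.1 then nx else acc.2.2.1,
         if ny > acc.2.2.2.1 then ny else acc.2.2.2.1,
         if ny < acc.2.2.2.2 then ny else acc.2.2.2.2))
      (acc, a, b, c, d) l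
    = (acc ++ l.map pvUpd,
       List.foldl max a (l.map (fun p => p.1 + p.2.2.1)),
       List.foldl min b (l.map (fun p => p.1 + p.2.2.1)),
       List.foldl max c (l.map (fun p => p.2.1 + p.2.2.2)),
       List.foldl min d (l.map (fun p => p.2.1 + p.2.2.2))) := by
  induction l generalizing acc a b c d with
  | nil => simp
  | cons p t ih =>
      simp only [List.foldl_cons, List.map_cons]
      rw [ih]
      simp [pvUpd, pv_if_gt_eq_max, pv_if_lt_eq_min]

lemma pv_moveA_eq (data : List (Int × Int × Int × Int)) :
    move_points data
    = (data.map pvUpd,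
       List.foldl max (-100000) (data.map (fun p => p.1 + p.2.2.1)),
       List.foldl min 100000 (data.map (fun p => p.1 + p.2.2.1)),
       List.foldl max (-100000) (data.map (fun p => p.2.1 + p.2.2.2)),
       List.foldl min 100000 (data.map (fun p => p.2.1 + p.2.2.2))) := by
  unfold move_points
  rw [pv_moveA_fold]
  simp

lemma pv_foldl_max_init (t : List Int) (a h : Int) :
    List.foldl max (max a h) t = max a (List.foldl max h t) := by
  induction t generalizing h with
  | nil => simp
  | cons x t ih => simp only [List.foldl_cons, max_assoc, ih]

lemma pv_foldl_min_init (t : List Int) (a h : Int) :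
    List.foldl min (min a h) t = min a (List.foldl min h t) := by
  induction t generalizing h with
  | nil => simp
  | cons x t ih => simp only [List.foldl_cons, min_assoc, ih]

-- B's max-with-default agrees with A's sentinel-seeded running max as soon as
-- some element reaches the sentinel (or the list is empty)
lemma pv_maxD_eq_foldl (xs : List Int) (d : Int) (h : ∃ x ∈ xs, d ≤ x) :
    PySem.List.maxD xs (fun y => y) d = List.foldl max d xs := by
  obtain ⟨x, hx, hdx⟩ := h
  cases xs with
  | nil => simp at hx
  | cons h0 t =>
      have hfold : d ≤ List.foldl max h0 t := by
        rcases List.mem_cons.mp hx with rfl | hxt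
        · exact le_trans hdx (PySem.List.le_foldl_max t x).1
        · exact le_trans hdx ((PySem.List.le_foldl_max t h0).2 x hxt)
      simp [PySem.List.maxD, PySem.List.max?_id_cons, List.foldl_cons]
      rw [show List.foldl max (max d h0) t = max d (List.foldl max h0 t) from
        pv_foldl_max_init t d h0, max_eq_right hfold]

lemma pv_minD_eq_foldl (xs : List Int) (d : Int) (h : ∃ x ∈ xs, x ≤ d) :
    PySem.List.minD xs (fun y => y) d = List.foldl min d xs := by
  obtain ⟨x, hx, hdx⟩ := h
  cases xs with
  | nil => simp at hx
  | cons h0 t =>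
      have hfold : List.foldl min h0 t ≤ d := by
        rcases List.mem_cons.mp hx with rfl | hxt
        · exact le_trans (PySem.List.foldl_min_le t x).1 hdx
        · exact le_trans ((PySem.List.foldl_min_le t h0).2 x hxt) hdx
      simp [PySem.List.minD, PySem.List.min?_id_cons, List.foldl_cons]
      rw [show List.foldl min (min d h0) t = min d (List.foldl min h0 t) from
        pv_foldl_min_init t d h0, min_eq_right hfold]

-- B's port, spelled out componentwise
lemma pv_moveB_eq (data : List (Int × Int × Int × Int)) :
    move_points_alt data
    = (data.map pvUpd,
       PySem.List.maxD (data.map (fun p => p.1 + p.2.2.1)) (fun y => y) (-100000),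
       PySem.List.minD (data.map (fun p => p.1 + p.2.2.1)) (fun y => y) 100000,
       PySem.List.maxD (data.map (fun p => p.2.1 + p.2.2.2)) (fun y => y) (-100000),
       PySem.List.minD (data.map (fun p => p.2.1 + p.2.2.2)) (fun y => y) 100000) := by
  simp [move_points_alt, pvUpd, List.map_map, Function.comp_def]

-- ===== VERDICT (by name: the statement is the Claim_ definition above) =====
theorem move_points_spec : Claim_unchanged_move_points := by
  intro data _
  unfold Spec_move_points
  intro hnd
  rw [pv_moveA_eq, pv_moveB_eq]
  cases data with
  | nil => simp [PySem.List.maxD, PySem.List.minD, PySem.List.max?, PySem.List.min?]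
  | cons p t =>
      have hne : (p :: t) ≠ ([] : List (Int × Int × Int × Int)) := by simp
      unfold D_move_points at hnd
      push Not at hnd
      have hpos := hnd hne 1 (by simp)
      have hneg := hnd hne (-1) (by simp)
      obtain ⟨⟨q2, hq2, h2⟩, ⟨q4, hq4, h4⟩⟩ := hpos
      obtain ⟨⟨q1, hq1, h1⟩, ⟨q3, hq3, h3⟩⟩ := hneg
      rw [pv_maxD_eq_foldl _ _ ⟨q1.1 + q1.2.2.1, List.mem_map_of_mem (f := fun p => p.1 + p.2.2.1) hq1, by omega⟩,
          pv_minD_eq_foldl _ _ ⟨q2.1 + q2.2.2.1, List.mem_map_of_mem (f := fun p => p.1 + p.2.2.1) hq2, by omega⟩,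
          pv_maxD_eq_foldl _ _ ⟨q3.2.1 + q3.2.2.2, List.mem_map_of_mem (f := fun p => p.2.1 + p.2.2.2) hq3, by omega⟩,
          pv_minD_eq_foldl _ _ ⟨q4.2.1 + q4.2.2.2, List.mem_map_of_mem (f := fun p => p.2.1 + p.2.2.2) hq4, by omega⟩]

theorem move_points_changed : Claim_changed_move_points := by
  unfold Claim_changed_move_points
  exact ⟨by decide, by decide, by decide, by decide, by decide⟩

theorem move_points_tight : Claim_exact_move_points := by
  intro data _ hD heq
  obtain ⟨hne, hor⟩ := hD
  obtain ⟨p, t, rfl⟩ : ∃ p t, data = p :: t := by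
    cases data with
    | nil => exact absurd rfl hne
    | cons p t => exact ⟨p, t, rfl⟩
  rw [pv_moveA_eq, pv_moveB_eq] at heq
  obtain ⟨s, hs, hsd⟩ := hor
  simp only [List.mem_cons, List.not_mem_nil, or_false] at hs
  have hor' : (∀ r ∈ p :: t, r.1 + r.2.2.1 < -100000) ∨ (∀ r ∈ p :: t, 100000 < r.1 + r.2.2.1) ∨
      (∀ r ∈ p :: t, r.2.1 + r.2.2.2 < -100000) ∨ (∀ r ∈ p :: t, 100000 < r.2.1 + r.2.2.2) := by
    rcases hs with rfl | rfl
    · rcases hsd with hall | hall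
      · exact Or.inr (Or.inl (fun q hq => by have := hall q hq; omega))
      · exact Or.inr (Or.inr (Or.inr (fun q hq => by have := hall q hq; omega)))
    · rcases hsd with hall | hall
      · exact Or.inl (fun q hq => by have := hall q hq; omega)
      · exact Or.inr (Or.inr (Or.inl (fun q hq => by have := hall q hq; omega)))
  rcases hor' with hall | hall | hall | hall
  · have hcomp := congrArg (fun r => r.2.1) heq
    simp only [List.map_cons] at hcomp
    have hAll : ∀ x ∈ (p :: t).map (fun p => p.1 + p.2.2.1), x < -100000 := by
      intro x hx
      obtain ⟨q, hq, rfl⟩ := List.mem_map.mp hx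
      exact hall q hq
    rw [show ((p :: t).map (fun p => p.1 + p.2.2.1))
          = (p.1 + p.2.2.1) :: t.map (fun p => p.1 + p.2.2.1) from List.map_cons ..] at hAll
    have hBmem := PySem.List.foldl_max_mem (t.map (fun p => p.1 + p.2.2.1)) (p.1 + p.2.2.1)
    have hBlt : List.foldl max (p.1 + p.2.2.1) (t.map (fun p => p.1 + p.2.2.1)) < -100000 := by
      rcases hBmem with hb | hb
      · rw [hb]; exact hAll _ (List.mem_cons_self)
      · exact hAll _ (List.mem_cons_of_mem _ hb)
    simp only [PySem.List.maxD, PySem.List.max?_id_cons, Option.getD_some] at hcomp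
    rw [List.foldl_cons] at hcomp
    rw [show List.foldl max (max (-100000 : Int) (p.1 + p.2.2.1)) (t.map (fun p => p.1 + p.2.2.1))
          = max (-100000) (List.foldl max (p.1 + p.2.2.1) (t.map (fun p => p.1 + p.2.2.1))) from
        pv_foldl_max_init ..] at hcomp
    omega
  · have hcomp := congrArg (fun r => r.2.2.1) heq
    simp only [List.map_cons] at hcomp
    have hAll : ∀ x ∈ ((p.1 + p.2.2.1) :: t.map (fun p => p.1 + p.2.2.1)), (100000 : Int) < x := by
      intro x hx
      rcases List.mem_cons.mp hx with rfl | hx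
      · exact hall p (List.mem_cons_self)
      · obtain ⟨q, hq, rfl⟩ := List.mem_map.mp hx
        exact hall q (List.mem_cons_of_mem _ hq)
    have hBmem := PySem.List.foldl_min_mem (t.map (fun p => p.1 + p.2.2.1)) (p.1 + p.2.2.1)
    have hBgt : (100000 : Int) < List.foldl min (p.1 + p.2.2.1) (t.map (fun p => p.1 + p.2.2.1)) := by
      rcases hBmem with hb | hb
      · rw [hb]; exact hAll _ (List.mem_cons_self)
      · exact hAll _ (List.mem_cons_of_mem _ hb)
    simp only [PySem.List.minD, PySem.List.min?_id_cons, Option.getD_some] at hcomp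
    rw [List.foldl_cons] at hcomp
    rw [show List.foldl min (min (100000 : Int) (p.1 + p.2.2.1)) (t.map (fun p => p.1 + p.2.2.1))
          = min (100000) (List.foldl min (p.1 + p.2.2.1) (t.map (fun p => p.1 + p.2.2.1))) from
        pv_foldl_min_init ..] at hcomp
    omega
  · have hcomp := congrArg (fun r => r.2.2.2.1) heq
    simp only [List.map_cons] at hcomp
    have hAll : ∀ x ∈ ((p.2.1 + p.2.2.2) :: t.map (fun p => p.2.1 + p.2.2.2)), x < (-100000 : Int) := by
      intro x hx
      rcases List.mem_cons.mp hx with rfl | hx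
      · exact hall p (List.mem_cons_self)
      · obtain ⟨q, hq, rfl⟩ := List.mem_map.mp hx
        exact hall q (List.mem_cons_of_mem _ hq)
    have hBmem := PySem.List.foldl_max_mem (t.map (fun p => p.2.1 + p.2.2.2)) (p.2.1 + p.2.2.2)
    have hBlt : List.foldl max (p.2.1 + p.2.2.2) (t.map (fun p => p.2.1 + p.2.2.2)) < -100000 := by
      rcases hBmem with hb | hb
      · rw [hb]; exact hAll _ (List.mem_cons_self)
      · exact hAll _ (List.mem_cons_of_mem _ hb)
    simp only [PySem.List.maxD, PySem.List.max?_id_cons, Option.getD_some] at hcomp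
    rw [List.foldl_cons] at hcomp
    rw [show List.foldl max (max (-100000 : Int) (p.2.1 + p.2.2.2)) (t.map (fun p => p.2.1 + p.2.2.2))
          = max (-100000) (List.foldl max (p.2.1 + p.2.2.2) (t.map (fun p => p.2.1 + p.2.2.2))) from
        pv_foldl_max_init ..] at hcomp
    omega
  · have hcomp := congrArg (fun r => r.2.2.2.2) heq
    simp only [List.map_cons] at hcomp
    have hAll : ∀ x ∈ ((p.2.1 + p.2.2.2) :: t.map (fun p => p.2.1 + p.2.2.2)), (100000 : Int) < x := by
      intro x hx
      rcases List.mem_cons.mp hx with rfl | hx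
      · exact hall p (List.mem_cons_self)
      · obtain ⟨q, hq, rfl⟩ := List.mem_map.mp hx
        exact hall q (List.mem_cons_of_mem _ hq)
    have hBmem := PySem.List.foldl_min_mem (t.map (fun p => p.2.1 + p.2.2.2)) (p.2.1 + p.2.2.2)
    have hBgt : (100000 : Int) < List.foldl min (p.2.1 + p.2.2.2) (t.map (fun p => p.2.1 + p.2.2.2)) := by
      rcases hBmem with hb | hb
      · rw [hb]; exact hAll _ (List.mem_cons_self)
      · exact hAll _ (List.mem_cons_of_mem _ hb)
    simp only [PySem.List.minD, PySem.List.min?_id_cons, Option.getD_some] at hcomp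
    rw [List.foldl_cons] at hcomp
    rw [show List.foldl min (min (100000 : Int) (p.2.1 + p.2.2.2)) (t.map (fun p => p.2.1 + p.2.2.2))
          = min (100000) (List.foldl min (p.2.1 + p.2.2.2) (t.map (fun p => p.2.1 + p.2.2.2))) from
        pv_foldl_min_init ..] at hcomp
    omega
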